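-- pv_equiv track=rewrite | github.com/LambertAlpha/garden-of-peony-pavilion | phase5_landscape.py | _lerp
-- ===== SOURCE A (Python) =====
-- def _lerp(p1, p2):
--     """简易 Bresenham XZ 插值"""
--     x1, z1 = p1
--     x2, z2 = p2
--     pts = []
--     dx, dz = abs(x2 - x1), abs(z2 - z1)
--     sx = 1 if x2 > x1 else -1
--     sz = 1 if z2 > z1 else -1
--     if dx >= dz:
--         err = 0
--         x, z = x1, z1
--         for _ in range(dx + 1):
--             pts.append((x, z))
--             err += dz
--             if 2 * err >= dx:
--                 z += sz
--                 err -= dx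
--             x += sx
--     else:
--         err = 0
--         x, z = x1, z1
--         for _ in range(dz + 1):
--             pts.append((x, z))
--             err += dx
--             if 2 * err >= dz:
--                 x += sx
--                 err -= dz
--             z += sz
--     if not pts:
--         pts = [(x1, z1)]
--     return pts
-- ===== SOURCE B (Python) =====
-- def _lerp(p1, p2):
--     """简易 Bresenham XZ 插值 — closed-form per-index version (no error accumulator)."""
--     x1, z1 = p1
--     x2, z2 = p2
--     dx, dz = abs(x2 - x1), abs(z2 - z1)
--     sx = 1 if x2 > x1 else -1
--     sz = 1 if z2 > z1 else -1
--     if p1 == p2: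
--         return [(x1, z1)]
--     if dx >= dz:
--         return [(x1 + sx * i, z1 + sz * ((2 * i * dz + dx) // (2 * dx)))
--                 for i in range(dx + 1)]
--     return [(x1 + sx * ((2 * i * dx + dz) // (2 * dz)), z1 + sz * i)
--             for i in range(dz + 1)]
-- ===== Notes on version B (the rewrite author's own statement) =====
-- stated objective: alternative
-- what changed: Replaces Bresenham's error-accumulating loop with a closed-form per-index comprehension: each minor-axis coordinate is computed directly as floor((2*i*minor_delta + major_delta)/(2*major_delta)), with an explicit p1==p2 guard instead of relying on leftover loop state.
import Mathlib
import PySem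

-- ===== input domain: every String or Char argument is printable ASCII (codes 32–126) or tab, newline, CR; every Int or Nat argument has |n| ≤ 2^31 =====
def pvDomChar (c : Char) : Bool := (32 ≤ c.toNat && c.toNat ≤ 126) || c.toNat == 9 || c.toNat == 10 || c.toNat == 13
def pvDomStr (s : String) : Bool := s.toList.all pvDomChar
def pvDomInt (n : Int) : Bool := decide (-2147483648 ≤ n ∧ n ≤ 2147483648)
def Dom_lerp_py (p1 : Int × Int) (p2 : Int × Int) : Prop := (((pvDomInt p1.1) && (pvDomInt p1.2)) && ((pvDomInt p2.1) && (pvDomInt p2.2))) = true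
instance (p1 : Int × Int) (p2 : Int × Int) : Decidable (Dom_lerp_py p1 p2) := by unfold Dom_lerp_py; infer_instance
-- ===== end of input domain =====

-- B replaces A's error-accumulating Bresenham loop by a closed-form per-index formula (alternative, same cost).

-- ===== PORT A =====
-- loop body of A's `dx >= dz` branch; state = (pts, err, x, z)
def stepA (dx dz sx sz : Int) (st : List (Int × Int) × Int × Int × Int) (_ : Int) :
    List (Int × Int) × Int × Int × Int :=
  let pts := st.1 ++ [(st.2.2.1, st.2.2.2)]
  let err := st.2.1 + dz
  let zerr := if 2 * err ≥ dx then (st.2.2.2 + sz, err - dx) else (st.2.2.2, err)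
  (pts, zerr.2, st.2.2.1 + sx, zerr.1)

-- loop body of A's `else` branch; state = (pts, err, x, z)
def stepB (dx dz sx sz : Int) (st : List (Int × Int) × Int × Int × Int) (_ : Int) :
    List (Int × Int) × Int × Int × Int :=
  let pts := st.1 ++ [(st.2.2.1, st.2.2.2)]
  let err := st.2.1 + dx
  let xerr := if 2 * err ≥ dz then (st.2.2.1 + sx, err - dz) else (st.2.2.1, err)
  (pts, xerr.2, xerr.1, st.2.2.2 + sz)

def lerp_py (p1 : Int × Int) (p2 : Int × Int) : List (Int × Int) :=
  let x1 := p1.1; let z1 := p1.2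
  let x2 := p2.1; let z2 := p2.2
  let dx := |x2 - x1|; let dz := |z2 - z1|
  let sx : Int := if x2 > x1 then 1 else -1
  let sz : Int := if z2 > z1 then 1 else -1
  let pts :=
    if dx ≥ dz then
      ((PySem.List.pyRange 0 (dx + 1) 1).foldl (stepA dx dz sx sz) ([], 0, x1, z1)).1
    else
      ((PySem.List.pyRange 0 (dz + 1) 1).foldl (stepB dx dz sx sz) ([], 0, x1, z1)).1
  if pts = [] then [(x1, z1)] else pts

-- ===== PORT B =====
def lerp_py_alt (p1 : Int × Int) (p2 : Int × Int) : List (Int × Int) :=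
  let x1 := p1.1; let z1 := p1.2
  let x2 := p2.1; let z2 := p2.2
  let dx := |x2 - x1|; let dz := |z2 - z1|
  let sx : Int := if x2 > x1 then 1 else -1
  let sz : Int := if z2 > z1 then 1 else -1
  if p1 = p2 then [(x1, z1)]
  else if dx ≥ dz then
    (PySem.List.pyRange 0 (dx + 1) 1).map
      (fun i => (x1 + sx * i, z1 + sz * PySem.Int.floordiv (2 * i * dz + dx) (2 * dx)))
  else
    (PySem.List.pyRange 0 (dz + 1) 1).map
      (fun i => (x1 + sx * PySem.Int.floordiv (2 * i * dx + dz) (2 * dz), z1 + sz * i))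

-- ===== PRECONDITION & SPEC =====
def Spec_lerp_py (p1 : Int × Int) (p2 : Int × Int) (out : List (Int × Int)) : Prop := out = lerp_py_alt p1 p2
instance (p1 : Int × Int) (p2 : Int × Int) (out : List (Int × Int)) : Decidable (Spec_lerp_py p1 p2 out) := by unfold Spec_lerp_py; infer_instance

-- ===== CLAIM (what is proved, stated in full; the proofs are below) =====
def Claim_equal_lerp_py : Prop := ∀ (p1 : Int × Int) (p2 : Int × Int), Dom_lerp_py p1 p2 → Spec_lerp_py p1 p2 (lerp_py p1 p2)

-- ===== LEMMAS AND PROOFS =====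

-- minor-axis offset after i major steps, closed form
def kf (d e i : Int) : Int := PySem.Int.floordiv (2 * i * e + d) (2 * d)

lemma kf_zero (d e : Int) (hd : 0 < d) : kf d e 0 = 0 := by
  unfold kf
  rw [PySem.Int.floordiv_eq_iff_of_pos (by omega)]
  constructor <;> nlinarith

lemma kf_succ (d e i : Int) (hd : 0 < d) (he0 : 0 ≤ e) (hed : e ≤ d) :
    kf d e (i + 1) = if 2 * ((i * e - kf d e i * d) + e) ≥ d then kf d e i + 1 else kf d e i := by
  obtain ⟨h1, h2⟩ : kf d e i * (2 * d) ≤ 2 * i * e + d ∧ 2 * i * e + d < (kf d e i + 1) * (2 * d) :=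
    (PySem.Int.floordiv_eq_iff_of_pos (by omega)).mp rfl
  generalize hq : kf d e i = q at *
  show PySem.Int.floordiv (2 * (i + 1) * e + d) (2 * d) = _
  split_ifs with h <;> rw [PySem.Int.floordiv_eq_iff_of_pos (by omega)] <;>
    constructor <;> nlinarith [h1, h2]

lemma loopA_inv (dx dz sx sz x1 z1 : Int) (hd : 0 < dx) (he0 : 0 ≤ dz) (hed : dz ≤ dx)
    (l : List Int) (acc : List (Int × Int)) :
    l.foldl (stepA dx dz sx sz) (acc, 0, x1, z1)
      = (acc ++ (List.range l.length).map (fun (j : Nat) => (x1 + sx * (j : Int), z1 + sz * kf dx dz (j : Int))),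
         (l.length : Int) * dz - kf dx dz l.length * dx,
         x1 + sx * l.length, z1 + sz * kf dx dz l.length) := by
  induction l using List.reverseRecOn with
  | nil => simp [kf_zero dx dz hd]
  | append_singleton l a ih =>
      rw [List.foldl_append, ih]
      have hk := kf_succ dx dz (l.length : Int) hd he0 hed
      simp only [stepA, List.foldl_cons, List.foldl_nil, List.length_append, List.length_singleton]
      push_cast
      by_cases h : 2 * ((l.length : Int) * dz - kf dx dz l.length * dx + dz) ≥ dx
      · rw [if_pos h] at hk
        rw [if_pos h]
        refine Prod.ext ?_ (Prod.ext (by push_cast [hk]; ring) (Prod.ext (by push_cast; ring) (by push_cast [hk]; ring)))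
        simp [List.range_succ]
      · rw [if_neg h] at hk
        rw [if_neg h]
        refine Prod.ext ?_ (Prod.ext (by push_cast [hk]; ring) (Prod.ext (by push_cast; ring) (by push_cast [hk]; ring)))
        simp [List.range_succ]

lemma loopB_inv (dx dz sx sz x1 z1 : Int) (hd : 0 < dz) (he0 : 0 ≤ dx) (hed : dx ≤ dz)
    (l : List Int) (acc : List (Int × Int)) :
    l.foldl (stepB dx dz sx sz) (acc, 0, x1, z1)
      = (acc ++ (List.range l.length).map (fun (j : Nat) => (x1 + sx * kf dz dx (j : Int), z1 + sz * (j : Int))),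
         (l.length : Int) * dx - kf dz dx l.length * dz,
         x1 + sx * kf dz dx l.length, z1 + sz * l.length) := by
  induction l using List.reverseRecOn with
  | nil => simp [kf_zero dz dx hd]
  | append_singleton l a ih =>
      rw [List.foldl_append, ih]
      have hk := kf_succ dz dx (l.length : Int) hd he0 hed
      simp only [stepB, List.foldl_cons, List.foldl_nil, List.length_append, List.length_singleton]
      push_cast
      by_cases h : 2 * ((l.length : Int) * dx - kf dz dx l.length * dz + dx) ≥ dz
      · rw [if_pos h] at hk
        rw [if_pos h]
        refine Prod.ext ?_ (Prod.ext (by push_cast [hk]; ring) (Prod.ext (by push_cast [hk]; ring) (by push_cast; ring)))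
        simp [List.range_succ]
      · rw [if_neg h] at hk
        rw [if_neg h]
        refine Prod.ext ?_ (Prod.ext (by push_cast [hk]; ring) (Prod.ext (by push_cast [hk]; ring) (by push_cast; ring)))
        simp [List.range_succ]

-- ===== VERDICT (by name: the statement is the Claim_ definition above) =====
theorem lerp_py_spec : Claim_equal_lerp_py := by
  intro p1 p2 _
  unfold Spec_lerp_py
  obtain ⟨x1, z1⟩ := p1
  obtain ⟨x2, z2⟩ := p2
  by_cases hpq : ((x1, z1) : Int × Int) = (x2, z2)
  · obtain ⟨hx, hz⟩ := Prod.mk.injEq .. ▸ hpq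
    subst hx; subst hz
    simp [lerp_py, lerp_py_alt, stepA, PySem.List.pyRange_one, List.range_succ]
  · have hne : ¬ (x2 = x1 ∧ z2 = z1) := by
      intro ⟨h1, h2⟩; exact hpq (by simp [h1, h2])
    simp only [lerp_py, lerp_py_alt, if_neg hpq]
    by_cases hbr : |x2 - x1| ≥ |z2 - z1|
    · have hdz0 : 0 ≤ |z2 - z1| := abs_nonneg _
      have hdx : 0 < |x2 - x1| := by
        rcases lt_or_eq_of_le (abs_nonneg (x2 - x1)) with h | h
        · exact h
        · exfalso
          have hx : x2 = x1 := by have := abs_eq_zero.mp h.symm; omega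
          have hz : z2 = z1 := by
            have : |z2 - z1| = 0 := le_antisymm (h ▸ hbr) hdz0
            have := abs_eq_zero.mp this; omega
          exact hne ⟨hx, hz⟩
      rw [if_pos hbr, if_pos hbr,
          loopA_inv _ _ _ _ _ _ hdx hdz0 hbr]
      rw [if_neg (by simp [PySem.List.length_pyRange_one])]
      simp only [List.nil_append, PySem.List.pyRange_one, List.map_map, List.length_map, List.length_range]
      refine List.map_congr_left (fun j _ => ?_)
      simp [kf, Function.comp]
    · have hdx0 : 0 ≤ |x2 - x1| := abs_nonneg _
      have hlt : |x2 - x1| < |z2 - z1| := not_le.mp hbr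
      have hdz : 0 < |z2 - z1| := lt_of_le_of_lt hdx0 hlt
      rw [if_neg hbr, if_neg hbr,
          loopB_inv _ _ _ _ _ _ hdz hdx0 hlt.le]
      rw [if_neg (by simp [PySem.List.length_pyRange_one])]
      simp only [List.nil_append, PySem.List.pyRange_one, List.map_map, List.length_map, List.length_range]
      refine List.map_congr_left (fun j _ => ?_)
      simp [kf, Function.comp]
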